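-- pv_equiv track=rewrite | github.com/topsilverr/_AlgorithmStudy | 코테실전연습/ssg/채팅방.py | solution
-- ===== SOURCE A (Python) =====
-- def solution(members, commands, messageIDs):
--     answer = []
--     res = []
--     read = []
--     for i in commands:
--         if i[0] == 'W' and i[1] == 'MY':
--             res = read
--             read = []
--         elif i[0] == 'W' and i[1] != 'MY':
--             read.append(i[2])
--         elif i[0] == 'R' and i[1] == 'MY':
--             res = read
--             read = []
--         elif i[0] == 'R' and i[1] != 'MY':
--             res = res
--
--     for j in messageIDs:
--         if j in res:
--             answer.append(True)
--         else:
--             answer.append(False)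
--     return answer
-- ===== SOURCE B (Python) =====
-- def solution(members, commands, messageIDs):
--     # boundary decomposition: find the MY commands, take the segment between
--     # the last two of them, collect its W-message ids into a set, then map membership
--     my = [k for k, c in enumerate(commands) if c[:2] in (['W', 'MY'], ['R', 'MY'])]
--     if not my:
--         return [False] * len(messageIDs)
--     last = my[-1]
--     prev = my[-2] if len(my) > 1 else -1
--     res = {c[2] for k, c in enumerate(commands)
--            if prev < k < last and c[0] == 'W' and c[1] != 'MY'}
--     return [j in res for j in messageIDs]
-- ===== Notes on version B (the rewrite author's own statement) =====
-- stated objective: alternative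
-- what changed: Replaces A's one-pass (res, read) state machine by a boundary decomposition: find the indices of the last two MY commands, collect the W message ids strictly between them into a set, then map membership over messageIDs.
import Mathlib
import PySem

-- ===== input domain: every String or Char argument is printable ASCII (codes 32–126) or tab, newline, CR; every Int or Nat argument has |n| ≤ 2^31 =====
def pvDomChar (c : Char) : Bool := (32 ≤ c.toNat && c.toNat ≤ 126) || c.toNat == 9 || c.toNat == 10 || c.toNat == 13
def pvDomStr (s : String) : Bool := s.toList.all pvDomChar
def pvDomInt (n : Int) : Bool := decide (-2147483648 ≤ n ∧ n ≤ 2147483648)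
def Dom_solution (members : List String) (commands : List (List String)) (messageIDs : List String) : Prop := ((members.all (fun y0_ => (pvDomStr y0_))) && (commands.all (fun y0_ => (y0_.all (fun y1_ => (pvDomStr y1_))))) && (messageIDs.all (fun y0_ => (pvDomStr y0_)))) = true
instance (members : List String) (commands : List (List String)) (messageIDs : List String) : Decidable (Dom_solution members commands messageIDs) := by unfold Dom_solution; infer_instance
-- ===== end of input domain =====

-- B replaces A's one-pass (res, read) state machine by a boundary decomposition:
-- locate the last two 'MY' commands and collect the W messages strictly between them
-- (objective: alternative decomposition, same cost).

-- ===== PORT A =====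
-- A-side helper: the loop body over the state (res, read); list accesses i[0], i[1], i[2]
-- use pyGet? with a "" default — inside Pre_solution every access is in range, so exact there.
def stepA (st : List String × List String) (i : List String) : List String × List String :=
  let i0 := (PySem.List.pyGet? i 0).getD ""
  let i1 := (PySem.List.pyGet? i 1).getD ""
  if i0 = "W" ∧ i1 = "MY" then (st.2, [])
  else if i0 = "W" ∧ i1 ≠ "MY" then (st.1, st.2 ++ [(PySem.List.pyGet? i 2).getD ""])
  else if i0 = "R" ∧ i1 = "MY" then (st.2, [])
  else st

def solution (members : List String) (commands : List (List String)) (messageIDs : List String) : List Bool :=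
  let st := commands.foldl stepA ([], [])
  messageIDs.foldl (fun answer j => answer ++ [if j ∈ st.1 then true else false]) []

-- ===== PORT B =====
-- B-side helper: `my = [k for k, c in enumerate(commands) if c[:2] in (['W','MY'], ['R','MY'])]`
def myIdx (commands : List (List String)) : List Int :=
  (PySem.List.enumerate commands 0).filterMap (fun kc =>
    if PySem.List.slice kc.2 none (some 2) = ["W", "MY"] ∨
       PySem.List.slice kc.2 none (some 2) = ["R", "MY"] then some kc.1 else none)

-- B-side helper: the set comprehension's underlying list
-- `[c[2] for k, c in enumerate(commands) if prev < k < last and c[0]=='W' and c[1]!='MY']`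
def segMsgs (prev last : Int) (commands : List (List String)) : List String :=
  (PySem.List.enumerate commands 0).filterMap (fun kc =>
    if prev < kc.1 ∧ kc.1 < last ∧ (PySem.List.pyGet? kc.2 0).getD "" = "W" ∧
       (PySem.List.pyGet? kc.2 1).getD "" ≠ "MY"
    then some ((PySem.List.pyGet? kc.2 2).getD "") else none)

def solution_alt (members : List String) (commands : List (List String)) (messageIDs : List String) : List Bool :=
  let my := myIdx commands
  match my.getLast? with
  | none => List.replicate messageIDs.length false
  | some last =>
    let prev : Int := (my.dropLast.getLast?).getD (-1)
    let res : PySem.Set String := PySem.Set.ofList (segMsgs prev last commands)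
    messageIDs.map (fun j => PySem.Set.contains res j)

-- ===== PRECONDITION & SPEC =====
-- Pre_: exactly the inputs on which Python A returns (A raises IndexError on an empty
-- command, on a 'W'/'R' command of length 1, and on a non-'MY' 'W' command of length < 3).
def Pre_solution (members : List String) (commands : List (List String)) (messageIDs : List String) : Prop :=
  ∀ c ∈ commands, c ≠ [] ∧
    (c.headD "" = "W" → 2 ≤ c.length ∧ (c.getD 1 "" ≠ "MY" → 3 ≤ c.length)) ∧
    (c.headD "" = "R" → 2 ≤ c.length)
instance (members : List String) (commands : List (List String)) (messageIDs : List String) : Decidable (Pre_solution members commands messageIDs) := by unfold Pre_solution; infer_instance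

def pvWitness_solution : List String × List (List String) × List String :=
  (["muzi"], [["W", "u1", "m1"], ["W", "MY"], ["W", "u1", "m2"], ["R", "MY"]], ["m1", "m2", "m3"])

def Spec_solution (members : List String) (commands : List (List String)) (messageIDs : List String) (out : List Bool) : Prop := out = solution_alt members commands messageIDs
instance (members : List String) (commands : List (List String)) (messageIDs : List String) (out : List Bool) : Decidable (Spec_solution members commands messageIDs out) := by unfold Spec_solution; infer_instance

-- ===== CLAIM (what is proved, stated in full; the proofs are below) =====
def Claim_equal_solution : Prop := ∀ (members : List String) (commands : List (List String)) (messageIDs : List String), Dom_solution members commands messageIDs → Pre_solution members commands messageIDs → Spec_solution members commands messageIDs (solution members commands messageIDs)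

-- ===== LEMMAS AND PROOFS =====

-- the boundaries: last MY index (or -1) and previous MY index (or -1)
def lastMY (cs : List (List String)) : Int := ((myIdx cs).getLast?).getD (-1)
def prevMY (cs : List (List String)) : Int := ((myIdx cs).dropLast.getLast?).getD (-1)

theorem pyGet1' (a : String) : (PySem.List.pyGet? [a] 1).getD "" = "" := by
  simp [PySem.List.pyGet?, PySem.List.pyIdx?]

theorem slice2 (a b : String) (t : List String) : PySem.List.slice (a::b::t) none (some 2) = [a,b] := by
  have := PySem.List.slice_to (xs := a::b::t) (b := 2) (by norm_num)
  simp at this; simp [this]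

theorem slice2' (a : String) : PySem.List.slice [a] none (some 2) = [a] := by
  have := PySem.List.slice_to (xs := [a]) (b := 2) (by norm_num)
  simp at this; simp [this]

theorem slice2'' : PySem.List.slice ([] : List String) none (some 2) = [] := by
  have := PySem.List.slice_to (xs := ([] : List String)) (b := 2) (by norm_num)
  simp at this; simp [this]

-- classification of a command, as A's getD-totalized fields see it
theorem isMY_iff (c : List String) :
    (PySem.List.slice c none (some 2) = ["W", "MY"] ∨ PySem.List.slice c none (some 2) = ["R", "MY"])
    ↔ (((PySem.List.pyGet? c 0).getD "" = "W" ∨ (PySem.List.pyGet? c 0).getD "" = "R")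
        ∧ (PySem.List.pyGet? c 1).getD "" = "MY") := by
  match c with
  | [] => simp [slice2'', PySem.List.pyGet?, PySem.List.pyIdx?]
  | [a] => simp [slice2', pyGet1']
  | a :: b :: t => simp [slice2]; tauto

theorem myIdx_append (cs : List (List String)) (c : List String) :
    myIdx (cs ++ [c]) = myIdx cs ++
      (if PySem.List.slice c none (some 2) = ["W", "MY"] ∨ PySem.List.slice c none (some 2) = ["R", "MY"]
       then [(cs.length : Int)] else []) := by
  unfold myIdx
  rw [PySem.List.enumerate_append, List.filterMap_append]
  simp [PySem.List.enumerate_cons, PySem.List.enumerate_nil]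
  split <;> simp_all

theorem segMsgs_append (a b : Int) (cs : List (List String)) (c : List String) :
    segMsgs a b (cs ++ [c]) = segMsgs a b cs ++
      (if a < (cs.length : Int) ∧ (cs.length : Int) < b ∧ (PySem.List.pyGet? c 0).getD "" = "W" ∧
          (PySem.List.pyGet? c 1).getD "" ≠ "MY"
       then [(PySem.List.pyGet? c 2).getD ""] else []) := by
  unfold segMsgs
  rw [PySem.List.enumerate_append, List.filterMap_append]
  simp [PySem.List.enumerate_cons, PySem.List.enumerate_nil]
  split <;> simp_all

theorem mem_myIdx_lt (cs : List (List String)) (x : Int) (hx : x ∈ myIdx cs) :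
    0 ≤ x ∧ x < (cs.length : Int) := by
  unfold myIdx at hx
  rw [List.mem_filterMap] at hx
  obtain ⟨kc, hmem, hval⟩ := hx
  rw [PySem.List.mem_enumerate_iff] at hmem
  obtain ⟨k, hk, rfl⟩ := hmem
  split at hval
  · simp at hval; omega
  · simp at hval

theorem segMsgs_nil (a b : Int) (cs : List (List String)) (h : b ≤ a + 1 ∨ b ≤ 0) : segMsgs a b cs = [] := by
  unfold segMsgs
  rw [List.filterMap_eq_nil_iff]
  intro kc hmem
  rw [PySem.List.mem_enumerate_iff] at hmem
  obtain ⟨k, hk, rfl⟩ := hmem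
  split
  · omega
  · rfl

theorem segMsgs_congr_upper (a b b' : Int) (cs : List (List String))
    (hb : (cs.length : Int) ≤ b) (hb' : (cs.length : Int) ≤ b') : segMsgs a b cs = segMsgs a b' cs := by
  unfold segMsgs
  apply List.filterMap_congr
  intro kc hmem
  rw [PySem.List.mem_enumerate_iff] at hmem
  obtain ⟨k, hk, rfl⟩ := hmem
  simp only [zero_add]
  refine if_congr ?_ rfl rfl
  constructor <;> rintro ⟨u, v, w⟩ <;> exact ⟨u, by omega, w⟩

theorem lastMY_lt (cs : List (List String)) : lastMY cs < (cs.length : Int) := by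
  unfold lastMY
  cases h : (myIdx cs).getLast? with
  | none => simp; omega
  | some x =>
    have hx := mem_myIdx_lt cs x (List.mem_of_getLast? h)
    simp; omega

-- the fold invariant: res is the segment between the last two MYs, read the tail segment
theorem fold_char (cs : List (List String)) :
    cs.foldl stepA ([], []) = (segMsgs (prevMY cs) (lastMY cs) cs, segMsgs (lastMY cs) (cs.length : Int) cs) := by
  induction cs using List.reverseRecOn with
  | nil => simp [myIdx, segMsgs, lastMY, prevMY, PySem.List.enumerate_nil]
  | append_singleton cs c ih =>
    rw [List.foldl_append, List.foldl_cons, List.foldl_nil, ih]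
    have hlast := lastMY_lt cs
    by_cases hMY : PySem.List.slice c none (some 2) = ["W", "MY"] ∨ PySem.List.slice c none (some 2) = ["R", "MY"]
    · obtain ⟨h0, h1⟩ := (isMY_iff c).mp hMY
      have hL : lastMY (cs ++ [c]) = (cs.length : Int) := by
        unfold lastMY; rw [myIdx_append, if_pos hMY, List.getLast?_concat]; rfl
      have hP : prevMY (cs ++ [c]) = lastMY cs := by
        unfold prevMY lastMY; rw [myIdx_append, if_pos hMY]
        rw [show myIdx cs ++ [(cs.length : Int)] = myIdx cs ++ [(cs.length : Int)] from rfl]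
        rw [List.dropLast_concat]
      have hstep : stepA (segMsgs (prevMY cs) (lastMY cs) cs, segMsgs (lastMY cs) (cs.length : Int) cs) c
          = (segMsgs (lastMY cs) (cs.length : Int) cs, []) := by
        unfold stepA
        rcases h0 with h0 | h0 <;> simp [h0, h1]
      rw [hstep, hL, hP]
      have e1 : segMsgs (lastMY cs) ((cs.length : Int)) (cs ++ [c])
          = segMsgs (lastMY cs) ((cs.length : Int)) cs := by
        rw [segMsgs_append, if_neg (by omega), List.append_nil]
      have e2 : segMsgs ((cs.length : Int)) ((cs.length : Int) + 1) (cs ++ [c]) = [] := by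
        rw [segMsgs_append, if_neg (by omega), List.append_nil]
        exact segMsgs_nil _ _ _ (by omega)
      simp [e1, e2]
    · have hmy : myIdx (cs ++ [c]) = myIdx cs := by
        rw [myIdx_append, if_neg hMY, List.append_nil]
      have hL : lastMY (cs ++ [c]) = lastMY cs := by unfold lastMY; rw [hmy]
      have hP : prevMY (cs ++ [c]) = prevMY cs := by unfold prevMY; rw [hmy]
      rw [hL, hP]
      have hnotMY := (isMY_iff c).not.mp hMY
      by_cases hW : (PySem.List.pyGet? c 0).getD "" = "W"
      · have hne : (PySem.List.pyGet? c 1).getD "" ≠ "MY" := by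
          intro h1; exact hnotMY ⟨Or.inl hW, h1⟩
        have hstep : stepA (segMsgs (prevMY cs) (lastMY cs) cs, segMsgs (lastMY cs) (cs.length : Int) cs) c
            = (segMsgs (prevMY cs) (lastMY cs) cs,
               segMsgs (lastMY cs) (cs.length : Int) cs ++ [(PySem.List.pyGet? c 2).getD ""]) := by
          unfold stepA; simp [hW, hne]
        rw [hstep]
        have e1 : segMsgs (prevMY cs) (lastMY cs) (cs ++ [c]) = segMsgs (prevMY cs) (lastMY cs) cs := by
          rw [segMsgs_append, if_neg (by omega), List.append_nil]
        have e2 : segMsgs (lastMY cs) ((cs.length : Int) + 1) (cs ++ [c])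
            = segMsgs (lastMY cs) ((cs.length : Int)) cs ++ [(PySem.List.pyGet? c 2).getD ""] := by
          rw [segMsgs_append]
          rw [if_pos ⟨hlast, by omega, hW, hne⟩]
          rw [segMsgs_congr_upper (lastMY cs) ((cs.length : Int) + 1) ((cs.length : Int)) cs
              (by omega) (by omega)]
        simp [e1, e2]
      · have hR : ¬((PySem.List.pyGet? c 0).getD "" = "R" ∧ (PySem.List.pyGet? c 1).getD "" = "MY") := by
          rintro ⟨h0, h1⟩; exact hnotMY ⟨Or.inr h0, h1⟩
        have hstep : ∀ st : List String × List String, stepA st c = st := by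
          intro st; unfold stepA
          rw [if_neg (by tauto), if_neg (by tauto), if_neg (by tauto)]
        rw [hstep]
        have e1 : segMsgs (prevMY cs) (lastMY cs) (cs ++ [c]) = segMsgs (prevMY cs) (lastMY cs) cs := by
          rw [segMsgs_append, if_neg (by tauto), List.append_nil]
        have e2 : segMsgs (lastMY cs) ((cs.length : Int) + 1) (cs ++ [c])
            = segMsgs (lastMY cs) ((cs.length : Int)) cs := by
          rw [segMsgs_append, if_neg (by tauto), List.append_nil]
          exact segMsgs_congr_upper _ _ _ _ (by omega) (by omega)
        simp [e1, e2]

theorem foldl_append_map (f : String → Bool) (ms : List String) (acc : List Bool) :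
    ms.foldl (fun answer j => answer ++ [f j]) acc = acc ++ ms.map f := by
  induction ms generalizing acc with
  | nil => simp
  | cons x xs ih => simp [List.foldl_cons, ih]

theorem contains_ofList (l : List String) (j : String) :
    PySem.Set.contains (PySem.Set.ofList l) j = l.contains j := by
  by_cases hj : j ∈ l <;> simp [hj, PySem.Set.mem_ofList]

theorem solutions_eq (members : List String) (commands : List (List String)) (messageIDs : List String) :
    solution members commands messageIDs = solution_alt members commands messageIDs := by
  unfold solution solution_alt
  rw [fold_char]
  rw [foldl_append_map]
  cases h : (myIdx commands).getLast? with
  | none =>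
    have hnil : myIdx commands = [] := List.getLast?_eq_none_iff.mp h
    have hlast : lastMY commands = -1 := by unfold lastMY; rw [hnil]; rfl
    have hres : segMsgs (prevMY commands) (lastMY commands) commands = [] := by
      rw [hlast]; exact segMsgs_nil _ _ _ (by omega)
    simp [h, hres]
  | some last =>
    have hlast : lastMY commands = last := by unfold lastMY; rw [h]; rfl
    simp only [h, hlast, List.nil_append]
    apply List.map_congr_left
    intro j hj
    rw [contains_ofList]
    unfold prevMY
    by_cases hm : j ∈ segMsgs (((myIdx commands).dropLast.getLast?).getD (-1)) last commands <;>
      simp [hm]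

-- ===== VERDICT (by name: the statement is the Claim_ definition above) =====
theorem solution_spec : Claim_equal_solution := by
  intro members commands messageIDs _ _
  unfold Spec_solution
  exact solutions_eq members commands messageIDs
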